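-- pv_equiv track=rewrite | github.com/mrazr/ctc_utils | my_ctc_utils.py | get_crop_sizes
-- ===== SOURCE A (Python) =====
-- from typing import Union, List, Tuple, Optional
--
-- def compute_last_img_size(sz, d) -> int:
--     cs = sz
--     for i in range(d-1):
--         cs -= 4
--         cs = cs // 2
--     return cs - 4
--
-- def get_crop_sizes(sz, d) -> List[int]:
--     sizes: List[int] = []
--
--     curr_img_size = compute_last_img_size(sz, d)
--     for i in range(d-1):
--         curr_img_size *= 2
--         sizes.append(curr_img_size)
--         curr_img_size -= 4
--     return sizes
-- ===== SOURCE B (Python) =====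
-- def get_crop_sizes(sz, d):
--     last = sz
--     for _ in range(d - 1):
--         last = (last - 4) // 2
--     last -= 4
--     return [((2 * last - 8) << i) + 8 for i in range(d - 1)]
-- ===== Notes on version B (the rewrite author's own statement) =====
-- stated objective: simpler
-- what changed: The accumulating up-path loop (curr*=2; append; curr-=4) is replaced by the closed form of its linear recurrence, sizes[i] = (2*last-8)*2**i + 8, emitted as a comprehension; only the non-invertible down-path floor-division loop is kept.
import Mathlib
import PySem

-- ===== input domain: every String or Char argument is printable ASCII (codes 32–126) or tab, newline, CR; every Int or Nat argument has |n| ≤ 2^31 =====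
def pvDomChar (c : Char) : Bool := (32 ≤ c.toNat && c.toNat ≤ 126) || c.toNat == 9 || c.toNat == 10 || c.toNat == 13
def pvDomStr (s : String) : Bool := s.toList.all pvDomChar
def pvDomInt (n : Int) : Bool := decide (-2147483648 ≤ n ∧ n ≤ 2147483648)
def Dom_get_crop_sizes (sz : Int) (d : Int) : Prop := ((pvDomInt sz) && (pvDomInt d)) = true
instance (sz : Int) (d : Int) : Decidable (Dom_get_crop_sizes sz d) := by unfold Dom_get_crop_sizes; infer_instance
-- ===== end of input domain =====

-- B replaces A's accumulating up-path loop (curr*=2; append; curr-=4) by the closed form of its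
-- linear recurrence, sizes[i] = (2*last-8)*2^i + 8; the non-invertible down-path loop is kept.

-- ===== PORT A =====
-- literal port of compute_last_img_size: 'for i in range(d-1): cs -= 4; cs //= 2' then 'cs - 4'
def compute_last_img_size (sz : Int) (d : Int) : Int :=
  ((List.range (d - 1).toNat).foldl (fun cs _ => PySem.Int.floordiv (cs - 4) 2) sz) - 4

-- literal port of A: state (sizes, curr_img_size); per step: curr *= 2; append curr; curr -= 4
def get_crop_sizes (sz : Int) (d : Int) : List Int :=
  ((List.range (d - 1).toNat).foldl
      (fun (p : List Int × Int) _ => (p.1 ++ [p.2 * 2], p.2 * 2 - 4))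
      ([], compute_last_img_size sz d)).1

-- ===== PORT B =====
-- port of Source B: down-path loop on 'last', then the comprehension over range(d-1);
-- Python's 'x << i' is exactly x * 2^i for i : Nat, ported as such
def get_crop_sizes_alt (sz : Int) (d : Int) : List Int :=
  let last := ((List.range (d - 1).toNat).foldl (fun l _ => PySem.Int.floordiv (l - 4) 2) sz) - 4
  (List.range (d - 1).toNat).map (fun i => (2 * last - 8) * 2 ^ i + 8)

-- ===== PRECONDITION & SPEC =====
def Spec_get_crop_sizes (sz : Int) (d : Int) (out : List Int) : Prop := out = get_crop_sizes_alt sz d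
instance (sz : Int) (d : Int) (out : List Int) : Decidable (Spec_get_crop_sizes sz d out) := by unfold Spec_get_crop_sizes; infer_instance

-- ===== CLAIM (what is proved, stated in full; the proofs are below) =====
def Claim_equal_get_crop_sizes : Prop := ∀ (sz : Int) (d : Int), Dom_get_crop_sizes sz d → Spec_get_crop_sizes sz d (get_crop_sizes sz d)

-- ===== LEMMAS AND PROOFS =====

-- closed form of the up-path loop: state after n steps
lemma up_loop_closed (n : Nat) (c : Int) :
    (List.range n).foldl (fun (p : List Int × Int) _ => (p.1 ++ [p.2 * 2], p.2 * 2 - 4)) ([], c)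
      = ((List.range n).map (fun i => (2 * c - 8) * 2 ^ i + 8), (c - 4) * 2 ^ n + 4) := by
  induction n with
  | zero => norm_num
  | succ m ih =>
    rw [List.range_succ, List.foldl_append, ih, List.map_append]
    simp only [List.foldl_cons, List.foldl_nil, List.map_cons, List.map_nil]
    refine Prod.ext ?_ ?_
    · simp only [List.append_cancel_left_eq, List.cons.injEq, and_true]; ring
    · show ((c - 4) * 2 ^ m + 4) * 2 - 4 = (c - 4) * 2 ^ (m + 1) + 4
      ring

theorem get_crop_sizes_eq_alt (sz d : Int) : get_crop_sizes sz d = get_crop_sizes_alt sz d := by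
  rw [get_crop_sizes, get_crop_sizes_alt, up_loop_closed, compute_last_img_size]

-- ===== VERDICT (by name: the statement is the Claim_ definition above) =====
theorem get_crop_sizes_spec : Claim_equal_get_crop_sizes := by
  intro sz d _
  exact get_crop_sizes_eq_alt sz d
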